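-- pv_equiv track=rewrite | github.com/reshadshuvo123/Fake_scientic_news_detections | SciPEP/FSND-BOC-scibert.py | dke_p
-- ===== SOURCE A (Python) =====
-- import itertools
--
-- def dke_p(pp1):
--     dke = [[' '.join(w[0] for w in g) for k, g in itertools.groupby(sen, key=lambda x: x[0] and x[1] != 'O') if k] for sen in pp1]
--     key_words=[]
--     for i in range(len(dke)):
--         for j in range(len(dke[i])):
--             p=dke[i][j].rstrip('.')
--             p=p.rstrip(',')
--             key_words.append(p)
--     return key_words
-- ===== SOURCE B (Python) =====
-- def dke_p(pp1):
--     # Staged passes: mark entity tokens, find phrase boundaries by comparing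
--     # neighbouring flags, then slice each (start, end) phrase out of the sentence.
--     key_words = []
--     for sen in pp1:
--         f = [bool(w) and t != 'O' for w, t in sen]
--         n = len(f)
--         starts = [i for i in range(n) if f[i] and (i == 0 or not f[i - 1])]
--         ends = [i + 1 for i in range(n) if f[i] and (i + 1 == n or not f[i + 1])]
--         for s, e in zip(starts, ends):
--             key_words.append(' '.join(w for w, _ in sen[s:e]).rstrip('.').rstrip(','))
--     return key_words
-- ===== Notes on version B (the rewrite author's own statement) =====
-- stated objective: alternative
-- what changed: Replaced itertools.groupby incremental grouping with staged passes: compute an entity-flag list, detect phrase start/end indices by comparing each flag with its neighbour, zip the boundary lists and slice each phrase out of the sentence.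
import Mathlib
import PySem

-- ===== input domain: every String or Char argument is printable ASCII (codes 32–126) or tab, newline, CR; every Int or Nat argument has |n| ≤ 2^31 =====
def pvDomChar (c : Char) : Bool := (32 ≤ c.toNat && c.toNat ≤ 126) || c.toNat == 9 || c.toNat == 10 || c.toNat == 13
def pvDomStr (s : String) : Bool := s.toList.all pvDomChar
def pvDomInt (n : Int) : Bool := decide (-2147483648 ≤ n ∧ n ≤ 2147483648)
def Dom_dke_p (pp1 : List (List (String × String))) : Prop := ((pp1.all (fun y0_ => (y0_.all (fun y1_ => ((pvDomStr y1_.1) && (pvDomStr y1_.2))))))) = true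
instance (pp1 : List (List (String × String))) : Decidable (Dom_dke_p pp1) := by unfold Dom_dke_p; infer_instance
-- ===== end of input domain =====

-- B replaces itertools.groupby incremental grouping by staged passes: an entity-flag
-- list, phrase start/end indices found by neighbour comparison, then zip + slice
-- (objective: alternative decomposition, same cost).


-- shared primitive: Python's s.rstrip(c) for a single-character chars argument
-- (exact: drops every trailing occurrence of c; PySem has no one-sided rstrip-with-chars)
def pyRstrip (s : String) (c : Char) : String :=
  String.ofList ((s.toList.reverse.dropWhile (· == c)).reverse)

-- ===== PORT A =====
-- key = x[0] and x[1] != 'O' : three distinct Python values '' / False / True, encoded 0 / 1 / 2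
def aKey (t : String × String) : Nat :=
  if t.1 = "" then 0 else if t.2 = "O" then 1 else 2

-- itertools.groupby(sen, key=aKey): maximal runs of consecutive equal keys
def aGroupby : List (String × String) → List (Nat × List (String × String))
  | [] => []
  | t :: ts =>
    (aKey t, t :: ts.takeWhile (fun x => aKey x == aKey t)) ::
      aGroupby (ts.dropWhile (fun x => aKey x == aKey t))
termination_by l => l.length
decreasing_by
  have h := List.length_dropWhile_le (fun x => aKey x == aKey t) ts
  simp only [List.length_cons]
  omega

def dke_p (pp1 : List (List (String × String))) : List String :=
  let dke := pp1.map (fun sen =>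
    ((aGroupby sen).filter (fun kg => kg.1 == 2)).map
      (fun kg => PySem.Str.join " " (kg.2.map (·.1))))
  dke.foldl (fun acc row =>
    row.foldl (fun acc p => acc ++ [pyRstrip (pyRstrip p '.') ',']) acc) []

-- ===== PORT B =====
-- p.rstrip('.').rstrip(',') applied to a finished phrase
def bFinish (p : String) : String := pyRstrip (pyRstrip p '.') ','

-- one sentence of B: flag list, boundary index lists, zip, slices
def bRow (sen : List (String × String)) : List String :=
  let f := sen.map (fun wt => wt.1 != "" && wt.2 != "O")
  let n := f.length
  let starts := (List.range n).filter
    (fun i => f.getD i false && (i == 0 || !(f.getD (i - 1) false)))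
  let ends := ((List.range n).filter
    (fun i => f.getD i false && (i + 1 == n || !(f.getD (i + 1) false)))).map (fun i => i + 1)
  (starts.zip ends).map (fun se =>
    bFinish (PySem.Str.join " "
      ((PySem.List.slice sen (some (Int.ofNat se.1)) (some (Int.ofNat se.2))).map (·.1))))

def dke_p_alt (pp1 : List (List (String × String))) : List String :=
  pp1.foldl (fun acc sen => acc ++ bRow sen) []

-- ===== PRECONDITION & SPEC =====
def Spec_dke_p (pp1 : List (List (String × String))) (out : List String) : Prop := out = dke_p_alt pp1
instance (pp1 : List (List (String × String))) (out : List String) : Decidable (Spec_dke_p pp1 out) := by unfold Spec_dke_p; infer_instance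

-- ===== CLAIM (what is proved, stated in full; the proofs are below) =====
def Claim_equal_dke_p : Prop := ∀ (pp1 : List (List (String × String))), Dom_dke_p pp1 → Spec_dke_p pp1 (dke_p pp1)

-- ===== LEMMAS AND PROOFS =====

-- the entity predicate both programs use, and its agreement with aKey
def qTok (t : String × String) : Bool := t.1 != "" && t.2 != "O"

theorem qTok_eq_key (t : String × String) : qTok t = (aKey t == 2) := by
  by_cases h1 : t.1 = "" <;> by_cases h2 : t.2 = "O" <;>
    simp [qTok, aKey, h1, h2]

-- the phrases A extracts from one sentence, already rstripped
def aPhr (sen : List (String × String)) : List String :=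
  ((aGroupby sen).filter (fun kg => kg.1 == 2)).map
    (fun kg => bFinish (PySem.Str.join " " (kg.2.map (·.1))))

-- canonical (start, end) pairs of the maximal true-runs of a flag list
def cRuns : Nat → List Bool → List (Nat × Nat)
  | _, [] => []
  | off, false :: bs => cRuns (off + 1) bs
  | off, true :: bs =>
      (off, off + 1 + (bs.takeWhile (fun b => b)).length) ::
        cRuns (off + 1 + (bs.takeWhile (fun b => b)).length) (bs.dropWhile (fun b => b))
termination_by _ l => l.length
decreasing_by
  · simp
  · have h := List.length_dropWhile_le (fun b => b) bs
    simp only [List.length_cons]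
    omega

-- run starts, scanned with the previous flag carried along
def sAux : Bool → Nat → List Bool → List Nat
  | _, _, [] => []
  | prev, off, b :: bs => (if b && !prev then [off] else []) ++ sAux b (off + 1) bs

-- run ends, scanned with lookahead
def eAux : Nat → List Bool → List Nat
  | _, [] => []
  | off, b :: bs => (if b && !(bs.getD 0 false) then [off + 1] else []) ++ eAux (off + 1) bs

theorem take_tw {α : Type} (p : α → Bool) (l : List α) :
    l.take (l.takeWhile p).length = l.takeWhile p := by
  induction l with
  | nil => simp
  | cons a l ih => by_cases h : p a <;> simp [h, ih]

theorem drop_tw {α : Type} (p : α → Bool) (l : List α) :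
    l.drop (l.takeWhile p).length = l.dropWhile p := by
  induction l with
  | nil => simp
  | cons a l ih => by_cases h : p a <;> simp [h, ih]

theorem starts_eq (f : List Bool) : ∀ (off : Nat) (prev : Bool),
    ((List.range f.length).filter
      (fun i => f.getD i false && (if i == 0 then !prev else !(f.getD (i - 1) false)))).map (· + off)
    = sAux prev off f := by
  induction f with
  | nil => intro off prev; simp [sAux]
  | cons b bs ih =>
    intro off prev
    rw [List.length_cons, List.range_succ_eq_map, List.filter_cons, List.filter_map]
    have hpred : ((fun i => (b :: bs).getD i false &&
        (if i == 0 then !prev else !((b :: bs).getD (i - 1) false))) ∘ Nat.succ)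
        = (fun i => bs.getD i false && (if i == 0 then !b else !(bs.getD (i - 1) false))) := by
      funext i
      cases i <;> simp
    rw [hpred]
    have htail : (((List.range bs.length).filter (fun i => bs.getD i false &&
        (if i == 0 then !b else !(bs.getD (i - 1) false)))).map Nat.succ).map (· + off)
        = ((List.range bs.length).filter (fun i => bs.getD i false &&
            (if i == 0 then !b else !(bs.getD (i - 1) false)))).map (· + (off + 1)) := by
      rw [List.map_map]
      apply List.map_congr_left
      intro i _
      simp only [Function.comp_apply, Nat.succ_eq_add_one]
      omega
    simp only [sAux, List.getD_cons_zero]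
    by_cases hb : (b && !prev) = true
    · rw [if_pos (by simpa using hb), if_pos hb, List.map_cons]
      rw [htail, ih (off + 1) b]
      simp
    · rw [if_neg (by simpa using hb), if_neg hb]
      rw [htail, ih (off + 1) b]
      simp

theorem ends_eq (f : List Bool) : ∀ (off : Nat),
    ((List.range f.length).filter
      (fun i => f.getD i false && !(f.getD (i + 1) false))).map (fun i => i + 1 + off)
    = eAux off f := by
  induction f with
  | nil => intro off; simp [eAux]
  | cons b bs ih =>
    intro off
    rw [List.length_cons, List.range_succ_eq_map, List.filter_cons, List.filter_map]
    have hpred : ((fun i => (b :: bs).getD i false && !((b :: bs).getD (i + 1) false)) ∘ Nat.succ)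
        = (fun i => bs.getD i false && !(bs.getD (i + 1) false)) := by
      funext i; simp
    rw [hpred]
    have htail : (((List.range bs.length).filter
          (fun i => bs.getD i false && !(bs.getD (i + 1) false))).map Nat.succ).map
            (fun i => i + 1 + off)
        = ((List.range bs.length).filter
            (fun i => bs.getD i false && !(bs.getD (i + 1) false))).map
              (fun i => i + 1 + (off + 1)) := by
      rw [List.map_map]
      apply List.map_congr_left
      intro i _
      simp only [Function.comp_apply, Nat.succ_eq_add_one]
      omega
    simp only [eAux, List.getD_cons_zero, List.getD_cons_succ]
    by_cases hb : (b && !(bs.getD 0 false)) = true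
    · rw [if_pos hb, if_pos hb, List.map_cons]
      rw [htail, ih (off + 1)]
      simp [Nat.add_comm]
    · rw [if_neg hb, if_neg hb]
      rw [htail, ih (off + 1)]
      simp

-- inside a run, the start scanner just walks to the end of the run
theorem sAux_run (bs : List Bool) : ∀ (off : Nat),
    sAux true off bs
      = sAux false (off + (bs.takeWhile (fun b => b)).length) (bs.dropWhile (fun b => b)) := by
  induction bs with
  | nil => intro off; simp [sAux]
  | cons b bs ih =>
    intro off
    cases b
    · simp [sAux]
    · rw [show sAux true off (true :: bs) = sAux true (off + 1) bs from by simp [sAux]]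
      rw [ih (off + 1)]
      have h1 : (true :: bs).takeWhile (fun b => b) = true :: bs.takeWhile (fun b => b) := by
        simp
      have h2 : (true :: bs).dropWhile (fun b => b) = bs.dropWhile (fun b => b) := by
        simp
      rw [h1, h2]
      rw [show off + (true :: bs.takeWhile (fun b => b)).length
        = off + 1 + (bs.takeWhile (fun b => b)).length from by
          simp only [List.length_cons]; omega]

theorem sAux_fst (f : List Bool) (off : Nat) :
    sAux false off f = (cRuns off f).map Prod.fst := by
  induction off, f using cRuns.induct with
  | case1 off => simp [sAux, cRuns]
  | case2 off bs ih => simp only [sAux, cRuns]; simpa using ih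
  | case3 off bs ih =>
    simp only [sAux, cRuns, List.map_cons]
    rw [sAux_run bs (off + 1)]
    rw [show off + 1 + (bs.takeWhile (fun b => b)).length
      = off + 1 + (bs.takeWhile (fun b => b)).length from rfl]
    rw [ih]
    simp

-- inside a run, the end scanner emits the run's end once, at its last true
theorem eAux_run (bs : List Bool) : ∀ (off : Nat),
    eAux off (true :: bs)
      = (off + 1 + (bs.takeWhile (fun b => b)).length)
          :: eAux (off + 1 + (bs.takeWhile (fun b => b)).length) (bs.dropWhile (fun b => b)) := by
  induction bs with
  | nil => intro off; simp [eAux]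
  | cons b bs ih =>
    intro off
    cases b
    · simp [eAux]
    · have h1 : eAux off (true :: true :: bs) = eAux (off + 1) (true :: bs) := by
        simp [eAux]
      rw [h1, ih (off + 1)]
      have h2 : (true :: bs).takeWhile (fun b => b) = true :: bs.takeWhile (fun b => b) := by
        simp
      have h3 : (true :: bs).dropWhile (fun b => b) = bs.dropWhile (fun b => b) := by
        simp
      rw [h2, h3]
      rw [show off + 1 + (true :: bs.takeWhile (fun b => b)).length
        = off + 1 + 1 + (bs.takeWhile (fun b => b)).length from by
          simp only [List.length_cons]; omega]

theorem eAux_snd (f : List Bool) (off : Nat) :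
    eAux off f = (cRuns off f).map Prod.snd := by
  induction off, f using cRuns.induct with
  | case1 off => simp [eAux, cRuns]
  | case2 off bs ih => simp only [eAux, cRuns]; simpa using ih
  | case3 off bs ih =>
    rw [eAux_run bs off]
    simp only [cRuns, List.map_cons]
    rw [ih]

-- cRuns at a shifted offset is the shift of cRuns
theorem cRuns_add (f : List Bool) (off : Nat) : ∀ (d : Nat),
    cRuns (off + d) f = (cRuns off f).map (fun se => (se.1 + d, se.2 + d)) := by
  induction off, f using cRuns.induct with
  | case1 off => intro d; simp [cRuns]
  | case2 off bs ih =>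
    intro d
    simp only [cRuns]
    rw [show off + d + 1 = (off + 1) + d from by omega]
    exact ih d
  | case3 off bs ih =>
    intro d
    simp only [cRuns, List.map_cons]
    rw [show off + d + 1 + (bs.takeWhile (fun b => b)).length
      = (off + 1 + (bs.takeWhile (fun b => b)).length) + d from by omega]
    rw [ih d]

-- skipping a non-entity head token does not change A's phrase list
theorem aPhr_cons_notqual (t : String × String) (ts : List (String × String))
    (hk : aKey t ≠ 2) : aPhr (t :: ts) = aPhr ts := by
  have hfilter : ((aKey t : Nat) == 2) = false := by simpa using hk
  have h1 : aPhr (t :: ts) = aPhr (ts.dropWhile (fun x => aKey x == aKey t)) := by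
    simp only [aPhr, aGroupby, List.filter_cons, hfilter]
    simp
  rw [h1]
  cases ts with
  | nil => simp
  | cons u us =>
    by_cases hu : aKey u = aKey t
    · have hud : ((u :: us).dropWhile (fun x => aKey x == aKey t))
          = us.dropWhile (fun x => aKey x == aKey t) := by
        simp [hu]
      have hku : ((aKey u : Nat) == 2) = false := by simpa [hu] using hk
      have h2 : aPhr (u :: us) = aPhr (us.dropWhile (fun x => aKey x == aKey u)) := by
        simp only [aPhr, aGroupby, List.filter_cons, hku]
        simp
      rw [hud, h2, hu]
    · have : ((aKey u : Nat) == aKey t) = false := by simpa using hu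
      simp [this]

-- main bridge: the runs of the flag list, sliced out of the sentence, are A's phrases
theorem runs_eq_aPhr (n : Nat) : ∀ (sen : List (String × String)), sen.length ≤ n →
    (cRuns 0 (sen.map qTok)).map (fun se =>
        bFinish (PySem.Str.join " " (((sen.drop se.1).take (se.2 - se.1)).map (·.1))))
      = aPhr sen := by
  induction n with
  | zero =>
    intro sen h
    have : sen = [] := List.length_eq_zero_iff.mp (Nat.le_zero.mp h)
    subst this
    simp [cRuns, aPhr, aGroupby]
  | succ n ih =>
    intro sen h
    cases sen with
    | nil => simp [cRuns, aPhr, aGroupby]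
    | cons t ts =>
      simp only [List.length_cons, Nat.add_le_add_iff_right] at h
      have hcomp : ((fun b => b) ∘ qTok) = qTok := rfl
      by_cases hq : qTok t = true
      · -- entity head: a phrase starts here
        have hk : aKey t = 2 := by
          have h2 := qTok_eq_key t
          rw [hq] at h2
          exact beq_iff_eq.mp h2.symm
        have hpred : (fun x => aKey x == aKey t) = qTok := by
          funext x; rw [qTok_eq_key, hk]
        set gl := (ts.takeWhile qTok).length with hgldef
        have e2 : (ts.map qTok).takeWhile (fun b => b) = (ts.takeWhile qTok).map qTok := by
          rw [List.takeWhile_map, hcomp]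
        have e3 : (ts.map qTok).dropWhile (fun b => b) = (ts.dropWhile qTok).map qTok := by
          rw [List.dropWhile_map, hcomp]
        have e4 : cRuns 0 ((t :: ts).map qTok)
            = (0, gl + 1) :: (cRuns 0 ((ts.dropWhile qTok).map qTok)).map
                (fun se => (se.1 + (gl + 1), se.2 + (gl + 1))) := by
          rw [List.map_cons, hq]
          rw [show cRuns 0 (true :: ts.map qTok)
            = (0, 0 + 1 + ((ts.map qTok).takeWhile (fun b => b)).length) ::
                cRuns (0 + 1 + ((ts.map qTok).takeWhile (fun b => b)).length)
                  ((ts.map qTok).dropWhile (fun b => b)) from by simp [cRuns]]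
          rw [e2, e3, List.length_map, ← hgldef]
          rw [show (0 : Nat) + 1 + gl = 0 + (gl + 1) from by omega]
          rw [cRuns_add]
          norm_num
        have hA : aPhr (t :: ts)
            = bFinish (PySem.Str.join " " ((t :: ts.takeWhile qTok).map (·.1)))
                :: aPhr (ts.dropWhile qTok) := by
          simp only [aPhr, aGroupby, hpred, List.filter_cons]
          rw [hk]
          simp
        rw [e4, hA, List.map_cons, List.map_map]
        refine congrArg₂ (· :: ·) ?_ ?_
        · simp only [List.drop_zero, Nat.sub_zero, List.take_succ_cons]
          rw [hgldef, take_tw]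
        · have hlen : (ts.dropWhile qTok).length ≤ n :=
            le_trans (List.length_dropWhile_le qTok ts) h
          rw [← ih (ts.dropWhile qTok) hlen]
          apply List.map_congr_left
          intro se _
          simp only [Function.comp_apply]
          rw [show se.2 + (gl + 1) - (se.1 + (gl + 1)) = se.2 - se.1 from by omega]
          rw [show se.1 + (gl + 1) = (gl + se.1) + 1 from by omega, List.drop_succ_cons]
          rw [← List.drop_drop]
          rw [hgldef, drop_tw]
      · -- non-entity head: skip it on both sides
        have hqf : qTok t = false := by simpa using hq
        have hk : aKey t ≠ 2 := by
          intro hcon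
          rw [qTok_eq_key, hcon] at hqf
          simp at hqf
        have e4 : cRuns 0 ((t :: ts).map qTok)
            = (cRuns 0 (ts.map qTok)).map (fun se => (se.1 + 1, se.2 + 1)) := by
          rw [List.map_cons, hqf]
          rw [show cRuns 0 (false :: ts.map qTok) = cRuns (0 + 1) (ts.map qTok) from by
            simp [cRuns]]
          rw [cRuns_add]
        rw [e4, aPhr_cons_notqual t ts hk, List.map_map]
        rw [← ih ts h]
        apply List.map_congr_left
        intro se _
        simp only [Function.comp_apply]
        rw [show se.2 + 1 - (se.1 + 1) = se.2 - se.1 from by omega]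
        rw [List.drop_succ_cons]

-- one sentence of B equals one sentence of A
theorem perSen (sen : List (String × String)) : bRow sen = aPhr sen := by
  have hqfun : (fun wt : String × String => wt.1 != "" && wt.2 != "O") = qTok := rfl
  simp only [bRow, hqfun]
  set f := sen.map qTok with hf
  have hstarts : (List.range f.length).filter
      (fun i => f.getD i false && (i == 0 || !(f.getD (i - 1) false))) = sAux false 0 f := by
    have hp : ∀ i ∈ List.range f.length,
        (f.getD i false && (i == 0 || !(f.getD (i - 1) false)))
          = (f.getD i false && (if i == 0 then !false else !(f.getD (i - 1) false))) := by
      intro i _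
      cases h0 : (i == 0) <;> simp_all
    rw [List.filter_congr hp]
    have := starts_eq f 0 false
    simpa using this
  have hends : ((List.range f.length).filter
      (fun i => f.getD i false && (i + 1 == f.length || !(f.getD (i + 1) false)))).map
        (fun i => i + 1) = eAux 0 f := by
    have hp : ∀ i ∈ List.range f.length,
        (f.getD i false && (i + 1 == f.length || !(f.getD (i + 1) false)))
          = (f.getD i false && !(f.getD (i + 1) false)) := by
      intro i hi
      by_cases hn : i + 1 = f.length
      · have hd : f.getD (i + 1) false = false := List.getD_eq_default _ _ (by omega)
        rw [hn] at hd
        simp only [hn, hd]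
        simp
      · have : ((i + 1 : Nat) == f.length) = false := by simpa using hn
        simp [this]
    rw [List.filter_congr hp]
    have := ends_eq f 0
    simpa using this
  rw [hstarts, hends, sAux_fst f 0, eAux_snd f 0, List.zip_map', List.map_map]
  have hslice : ∀ se : Nat × Nat,
      PySem.List.slice sen (some (Int.ofNat se.1)) (some (Int.ofNat se.2))
        = (sen.drop se.1).take (se.2 - se.1) := by
    intro se
    rw [show Int.ofNat se.1 = ((se.1 : Nat) : Int) from rfl,
        show Int.ofNat se.2 = ((se.2 : Nat) : Int) from rfl]
    exact PySem.List.slice_natCast sen se.1 se.2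
  calc ((cRuns 0 f).map ((fun se => bFinish (PySem.Str.join " "
          ((PySem.List.slice sen (some (Int.ofNat se.1)) (some (Int.ofNat se.2))).map (·.1))))
            ∘ (fun x => (x.1, x.2))))
      = (cRuns 0 f).map (fun se => bFinish (PySem.Str.join " "
          (((sen.drop se.1).take (se.2 - se.1)).map (·.1)))) := by
        apply List.map_congr_left
        intro se _
        simp only [Function.comp_apply, hslice]
    _ = aPhr sen := runs_eq_aPhr sen.length sen (le_refl _)

-- A's inner index loop over a row appends the rstripped entries
theorem row_loop (row : List String) (acc : List String) :
    row.foldl (fun acc p => acc ++ [pyRstrip (pyRstrip p '.') ',']) acc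
      = acc ++ row.map (fun p => pyRstrip (pyRstrip p '.') ',') := by
  induction row generalizing acc with
  | nil => simp
  | cons x xs ih => simp [ih, List.append_assoc]

-- the two top-level folds agree
theorem folds_agree (l : List (List (String × String))) :
    ∀ acc : List String,
      (l.map (fun sen =>
        ((aGroupby sen).filter (fun kg => kg.1 == 2)).map
          (fun kg => PySem.Str.join " " (kg.2.map (·.1))))).foldl
        (fun acc row =>
          row.foldl (fun acc p => acc ++ [pyRstrip (pyRstrip p '.') ',']) acc) acc
      = l.foldl (fun acc sen => acc ++ bRow sen) acc := by
  induction l with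
  | nil => intro acc; simp
  | cons sen rest ih =>
    intro acc
    simp only [List.map_cons, List.foldl_cons]
    rw [row_loop, ih]
    congr 1
    rw [perSen, aPhr, List.map_map]
    rfl

-- ===== VERDICT (by name: the statement is the Claim_ definition above) =====
theorem dke_p_spec : Claim_equal_dke_p := by
  intro pp1 _
  show dke_p pp1 = dke_p_alt pp1
  unfold dke_p dke_p_alt
  exact folds_agree pp1 []
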